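-- pv_equiv track=rewrite | github.com/Julian-C10/cicero-discord-bot | src/util.py | list_string_format
-- ===== SOURCE A (Python) =====
-- def list_string_format(maxLatinLen, latinText, englishText):
--     i = 0
--     msg = ''
--     for c in latinText:
--         msg += c
--         i += 1
--     while i < maxLatinLen:
--         msg += ' '
--         i += 1
--     i = 0
--     for c in englishText:
--         msg += c
--     msg += '\n'
--     return msg
-- ===== SOURCE B (Python) =====
-- def list_string_format(maxLatinLen, latinText, englishText):
--     return latinText + ' ' * (maxLatinLen - len(latinText)) + englishText + '\n'
-- ===== Notes on version B (the rewrite author's own statement) =====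
-- stated objective: simpler
-- what changed: Replaces the character-copy loop, the counter, and the padding while-loop with a single closed-form concatenation whose pad width is computed from the lengths.
import Mathlib
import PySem

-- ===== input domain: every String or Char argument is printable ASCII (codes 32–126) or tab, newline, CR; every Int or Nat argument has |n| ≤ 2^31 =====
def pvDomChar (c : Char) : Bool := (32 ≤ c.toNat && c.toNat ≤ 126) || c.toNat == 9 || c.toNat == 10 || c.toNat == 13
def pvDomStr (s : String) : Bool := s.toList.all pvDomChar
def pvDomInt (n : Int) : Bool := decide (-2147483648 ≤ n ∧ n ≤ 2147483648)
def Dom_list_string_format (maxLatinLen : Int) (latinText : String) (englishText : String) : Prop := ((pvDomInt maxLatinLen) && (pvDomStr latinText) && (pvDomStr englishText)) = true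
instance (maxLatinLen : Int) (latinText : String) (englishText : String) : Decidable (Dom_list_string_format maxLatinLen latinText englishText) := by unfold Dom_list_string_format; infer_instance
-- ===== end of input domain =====

-- B replaces A's per-character copy loop, counter and padding while-loop with one closed-form
-- concatenation whose pad width is computed from the lengths (objective: simpler).


-- ===== PORT A =====
-- 'while i < maxLatinLen: msg += ' '; i += 1', transcribed as recursion on (maxLatinLen - i).toNat
def lsfPadLoop (msg : List Char) (i m : Int) : List Char :=
  if h : i < m then lsfPadLoop (msg ++ [' ']) (i + 1) m else msg
termination_by (m - i).toNat
decreasing_by omega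

def list_string_format (maxLatinLen : Int) (latinText : String) (englishText : String) : String :=
  -- i = 0; msg = ''; for c in latinText: msg += c; i += 1
  let p := latinText.toList.foldl (fun (p : List Char × Int) c => (p.1 ++ [c], p.2 + 1)) ([], 0)
  -- while i < maxLatinLen: msg += ' '; i += 1
  let msg := lsfPadLoop p.1 p.2 maxLatinLen
  -- i = 0 (dead); for c in englishText: msg += c
  let msg := englishText.toList.foldl (fun acc c => acc ++ [c]) msg
  -- msg += '\n'
  String.mk (msg ++ ['\n'])

-- ===== PORT B =====
def list_string_format_alt (maxLatinLen : Int) (latinText : String) (englishText : String) : String :=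
  String.mk (latinText.toList
    ++ PySem.List.pyRepeat [' '] (maxLatinLen - PySem.Chars.len latinText.toList)
    ++ englishText.toList ++ ['\n'])

-- ===== PRECONDITION & SPEC =====
def Spec_list_string_format (maxLatinLen : Int) (latinText : String) (englishText : String) (out : String) : Prop := out = list_string_format_alt maxLatinLen latinText englishText
instance (maxLatinLen : Int) (latinText : String) (englishText : String) (out : String) : Decidable (Spec_list_string_format maxLatinLen latinText englishText out) := by unfold Spec_list_string_format; infer_instance

-- ===== CLAIM (what is proved, stated in full; the proofs are below) =====
def Claim_equal_list_string_format : Prop := ∀ (maxLatinLen : Int) (latinText : String) (englishText : String), Dom_list_string_format maxLatinLen latinText englishText → Spec_list_string_format maxLatinLen latinText englishText (list_string_format maxLatinLen latinText englishText)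

-- ===== LEMMAS AND PROOFS =====
-- A's first loop copies the characters and counts them
theorem lsf_copy_count (l acc : List Char) (i : Int) :
    l.foldl (fun (p : List Char × Int) c => (p.1 ++ [c], p.2 + 1)) (acc, i)
      = (acc ++ l, i + l.length) := by
  induction l generalizing acc i with
  | nil => simp
  | cons c t ih => simp [List.foldl, ih (acc ++ [c]) (i + 1)]; omega

-- A's while-loop appends (m - i).toNat spaces
theorem lsfPadLoop_eq (msg : List Char) (i m : Int) :
    lsfPadLoop msg i m = msg ++ List.replicate (m - i).toNat ' ' := by
  by_cases h : i < m
  · rw [lsfPadLoop, dif_pos h, lsfPadLoop_eq (msg ++ [' ']) (i + 1) m]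
    have : (m - i).toNat = (m - (i + 1)).toNat + 1 := by omega
    rw [this, List.replicate_succ, List.append_assoc]
    rfl
  · rw [lsfPadLoop, dif_neg h]
    have : (m - i).toNat = 0 := by omega
    simp [this]
termination_by (m - i).toNat
decreasing_by omega

-- A's third loop appends the english characters
theorem lsf_copy (l acc : List Char) :
    l.foldl (fun acc c => acc ++ [c]) acc = acc ++ l := by
  induction l generalizing acc with
  | nil => simp
  | cons c t ih => simp [List.foldl, ih (acc ++ [c])]

-- ===== VERDICT (by name: the statement is the Claim_ definition above) =====
theorem list_string_format_spec : Claim_equal_list_string_format := by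
  intro m lt et _
  unfold Spec_list_string_format list_string_format list_string_format_alt
  simp only [lsf_copy_count, lsfPadLoop_eq, lsf_copy, PySem.List.pyRepeat_singleton,
    PySem.Chars.len_eq, List.nil_append, Int.zero_add, List.append_assoc]
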